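-- pv_equiv track=rewrite | github.com/DarkWinD1437/CriptografiaPython | cifrado_por_sustitucion.py | cifrado_transposicion_grupos
-- ===== SOURCE A (Python) =====
-- def cifrado_transposicion_grupos(mensaje, tam_grupo, permutacion):
--     # Validar argumentos
--     if not isinstance(mensaje, str):
--         raise TypeError("El mensaje debe ser una cadena de texto.")
--     if not isinstance(tam_grupo, int) or tam_grupo <= 0:
--         raise ValueError("El tamaño del grupo debe ser un entero positivo.")
--     if not isinstance(permutacion, list) or len(permutacion) != tam_grupo:
--         raise ValueError("La permutación debe ser una lista con el mismo tamaño que el grupo.")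
--
--     # Dividir el mensaje en grupos
--     grupos = []
--     for i in range(0, len(mensaje), tam_grupo):
--         grupo = mensaje[i:i + tam_grupo]
--         if len(grupo) < tam_grupo:
--             grupo += ' ' * (tam_grupo - len(grupo))  # Rellenar con espacios si el grupo es incompleto
--         grupos.append(grupo)
--
--     # Aplicar la permutación a cada grupo
--     mensaje_cifrado = ""
--     for grupo in grupos:
--         grupo_cifrado = [grupo[i] for i in permutacion]
--         mensaje_cifrado += "".join(grupo_cifrado)
--
--     return mensaje_cifrado
-- ===== SOURCE B (Python) =====
-- def cifrado_transposicion_grupos(mensaje, tam_grupo, permutacion):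
--     # Validar argumentos
--     if not isinstance(mensaje, str):
--         raise TypeError("El mensaje debe ser una cadena de texto.")
--     if not isinstance(tam_grupo, int) or tam_grupo <= 0:
--         raise ValueError("El tamaño del grupo debe ser un entero positivo.")
--     if not isinstance(permutacion, list) or len(permutacion) != tam_grupo:
--         raise ValueError("La permutación debe ser una lista con el mismo tamaño que el grupo.")
--
--     # Work column-wise: pad the message to a multiple of tam_grupo, slice it
--     # into the tam_grupo columns of the group matrix, pick the columns in the
--     # order given by the permutation, and re-interleave them row by row.
--     padded = mensaje + ' ' * (-len(mensaje) % tam_grupo)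
--     columnas = [padded[j::tam_grupo] for j in range(tam_grupo)]
--     filas = zip(*(columnas[p] for p in permutacion))
--     return ''.join(''.join(fila) for fila in filas)
-- ===== Notes on version B (the rewrite author's own statement) =====
-- stated objective: alternative
-- what changed: Replaces the build-padded-groups-then-permute-each-group structure by a column-wise algorithm: pad once, slice the padded text into its tam_grupo strided columns, select columns in permutation order and re-interleave them row by row with zip; Pre_ excludes permutation entries outside Python's index range [-tam_grupo, tam_grupo), where A raises IndexError on any non-empty message but returns '' on the empty message (the bad entry goes unchecked) while B raises there.
-- outside the precondition, e.g. on cifrado_transposicion_grupos('', 2, [5, 0]): A returns '', B raises IndexError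
import Mathlib
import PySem

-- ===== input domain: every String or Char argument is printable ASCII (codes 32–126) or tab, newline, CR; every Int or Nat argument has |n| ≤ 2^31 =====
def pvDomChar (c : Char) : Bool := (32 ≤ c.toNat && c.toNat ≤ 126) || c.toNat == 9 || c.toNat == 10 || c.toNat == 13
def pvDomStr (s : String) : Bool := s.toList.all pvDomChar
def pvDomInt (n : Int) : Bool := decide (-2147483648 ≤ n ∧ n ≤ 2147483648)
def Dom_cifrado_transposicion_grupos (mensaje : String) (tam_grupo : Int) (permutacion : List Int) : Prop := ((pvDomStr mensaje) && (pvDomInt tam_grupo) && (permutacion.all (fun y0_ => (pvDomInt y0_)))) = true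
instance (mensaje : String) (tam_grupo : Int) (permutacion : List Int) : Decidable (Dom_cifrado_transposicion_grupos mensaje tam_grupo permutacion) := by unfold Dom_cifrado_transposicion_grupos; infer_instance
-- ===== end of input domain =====

-- B is a column-wise algorithm: pad the message once, slice the padded text into its
-- tam_grupo strided columns, select the columns in permutation order and re-interleave
-- them row by row with zip; equivalence of the RETURN value is proved on Pre_.

-- ===== PORT A =====
def cifrado_transposicion_grupos (mensaje : String) (tam_grupo : Int) (permutacion : List Int) : String :=
  let cs := mensaje.toList
  -- grupos: for i in range(0, len(mensaje), tam_grupo): slice, pad with spaces if short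
  let grupos := (PySem.List.pyRange 0 (cs.length : Int) tam_grupo).map (fun i =>
    let grupo := PySem.List.slice cs (some i) (some (i + tam_grupo))
    if (grupo.length : Int) < tam_grupo then
      grupo ++ List.replicate (tam_grupo - (grupo.length : Int)).toNat ' '
    else grupo)
  -- mensaje_cifrado += "".join([grupo[i] for i in permutacion])
  let mensaje_cifrado := grupos.foldl (fun acc grupo =>
    acc ++ permutacion.map (fun i => (PySem.List.pyGet? grupo i).getD ' ')) []
  String.ofList mensaje_cifrado

-- ===== PORT B =====
-- zip(*ls) over lists of Chars: rows until some list runs out (the fuel only bounds the recursion)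
def pvZipStar : Nat → List (List Char) → List (List Char)
  | 0, _ => []
  | n + 1, ls =>
    if ls.isEmpty || ls.any List.isEmpty then []
    else ls.map (fun l => l.headD ' ') :: pvZipStar n (ls.map List.tail)

def cifrado_transposicion_grupos_alt (mensaje : String) (tam_grupo : Int) (permutacion : List Int) : String :=
  let cs := mensaje.toList
  -- padded = mensaje + ' ' * (-len(mensaje) % tam_grupo)
  let padded := cs ++ List.replicate (PySem.Int.mod (-(cs.length : Int)) tam_grupo).toNat ' '
  -- columnas = [padded[j::tam_grupo] for j in range(tam_grupo)]
  let columnas := (PySem.List.pyRange 0 tam_grupo 1).map (fun j =>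
    (PySem.List.slice? padded (some j) none tam_grupo).getD [])
  -- filas = zip(*(columnas[p] for p in permutacion))
  let seleccion := permutacion.map (fun p => (PySem.List.pyGet? columnas p).getD [])
  let filas := pvZipStar (seleccion.headD []).length seleccion
  -- ''.join(''.join(fila) for fila in filas)
  String.ofList filas.flatten

-- ===== PRECONDITION & SPEC =====
-- Pre_ excludes the inputs where A raises (tam_grupo ≤ 0 or a permutation of the wrong
-- length: ValueError; a permutation entry outside Python's index range [-t, t):
-- IndexError on every non-empty message). For the EMPTY message with such an
-- out-of-range entry A returns "" (it never indexes any group, so the bad entry goes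
-- unchecked) while B's column lookup raises IndexError, so those inputs are excluded too.
def Pre_cifrado_transposicion_grupos (mensaje : String) (tam_grupo : Int) (permutacion : List Int) : Prop :=
  0 < tam_grupo ∧ (permutacion.length : Int) = tam_grupo ∧
    ∀ p ∈ permutacion, -tam_grupo ≤ p ∧ p < tam_grupo
instance (mensaje : String) (tam_grupo : Int) (permutacion : List Int) : Decidable (Pre_cifrado_transposicion_grupos mensaje tam_grupo permutacion) := by unfold Pre_cifrado_transposicion_grupos; infer_instance
def pvWitness_cifrado_transposicion_grupos : String × Int × List Int := ("abcd", 3, [2, 0, 1])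

def Spec_cifrado_transposicion_grupos (mensaje : String) (tam_grupo : Int) (permutacion : List Int) (out : String) : Prop := out = cifrado_transposicion_grupos_alt mensaje tam_grupo permutacion
instance (mensaje : String) (tam_grupo : Int) (permutacion : List Int) (out : String) : Decidable (Spec_cifrado_transposicion_grupos mensaje tam_grupo permutacion out) := by unfold Spec_cifrado_transposicion_grupos; infer_instance

-- ===== CLAIM (what is proved, stated in full; the proofs are below) =====
def Claim_equal_cifrado_transposicion_grupos : Prop := ∀ (mensaje : String) (tam_grupo : Int) (permutacion : List Int), Dom_cifrado_transposicion_grupos mensaje tam_grupo permutacion → Pre_cifrado_transposicion_grupos mensaje tam_grupo permutacion → Spec_cifrado_transposicion_grupos mensaje tam_grupo permutacion (cifrado_transposicion_grupos mensaje tam_grupo permutacion)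

-- ===== LEMMAS AND PROOFS =====

-- p % t for a Python in-range index −t ≤ p < t, t > 0
lemma pv_mod_inrange (p t : Int) (ht : 0 < t) (h0 : -t ≤ p) (h1 : p < t) :
    PySem.Int.mod p t = if 0 ≤ p then p else p + t := by
  rw [PySem.Int.mod_eq_emod_of_pos ht]
  split_ifs with hp
  · exact Int.emod_eq_of_lt hp h1
  · calc p % t = (p + t * 1) % t := (Int.add_mul_emod_self_left p t 1).symm
      _ = p + t * 1 := Int.emod_eq_of_lt (by omega) (by omega)
      _ = p + t := by ring

-- t divides len + (-len) % t  (the padded length is a multiple of t)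
lemma pv_dvd_padded (n t : Int) (ht : 0 < t) :
    t ∣ n + PySem.Int.mod (-n) t := by
  rw [PySem.Int.mod_eq_emod_of_pos ht, Int.dvd_iff_emod_eq_zero, Int.add_emod,
    Int.emod_emod_of_dvd _ (dvd_refl t), ← Int.add_emod]
  simp

-- Python l[p] for −t ≤ p < t on a list of length t is l[(p % t)]
lemma pv_pyGet_inrange {α : Type} (l : List α) (p t : Int) (ht : 0 < t)
    (hl : (l.length : Int) = t) (hp0 : -t ≤ p) (hp1 : p < t) :
    PySem.List.pyGet? l p = l[(PySem.Int.mod p t).toNat]? := by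
  have hm : PySem.Int.mod p t = if 0 ≤ p then p else p + t := pv_mod_inrange p t ht hp0 hp1
  rw [PySem.List.pyGet?]
  unfold PySem.List.pyIdx?
  rcases le_or_gt 0 p with h | h
  · rw [if_pos h, if_pos (by omega)]
    simp only [Option.bind_some]
    congr 1
    simp [hm, h]
  · rw [if_neg (by omega), if_pos (by omega)]
    simp only [Option.bind_some]
    congr 1
    simp only [hm, if_neg (not_le.mpr h)]
    omega

-- A's group-building fold reads the padded message at base + (p % t)
lemma pv_core_A (cs : List Char) (t : Int) (perm : List Int) (ht : 0 < t)
    (hb : ∀ p ∈ perm, -t ≤ p ∧ p < t) :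
    ((PySem.List.pyRange 0 (cs.length : Int) t).map (fun i =>
        let grupo := PySem.List.slice cs (some i) (some (i + t))
        if (grupo.length : Int) < t then
          grupo ++ List.replicate (t - (grupo.length : Int)).toNat ' '
        else grupo)).foldl (fun acc grupo =>
          acc ++ perm.map (fun i => (PySem.List.pyGet? grupo i).getD ' ')) []
    = (PySem.List.pyRange 0 (((cs ++ List.replicate (PySem.Int.mod (-(cs.length : Int)) t).toNat ' ').length : Int)) t).flatMap (fun base =>
        perm.map (fun p =>
          (PySem.List.pyGet? (cs ++ List.replicate (PySem.Int.mod (-(cs.length : Int)) t).toNat ' ')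
            (base + PySem.Int.mod p t)).getD ' ')) := by
  set n : ℕ := cs.length with hn
  set pad : Int := PySem.Int.mod (-(n : Int)) t with hpaddef
  have hpad0 : 0 ≤ pad := PySem.Int.mod_nonneg _ ht
  have hpadt : pad < t := PySem.Int.mod_lt _ ht
  obtain ⟨q, hq⟩ := pv_dvd_padded (n : Int) t ht
  set padded : List Char := cs ++ List.replicate pad.toNat ' ' with hpdef
  have hplen : padded.length = n + pad.toNat := by
    simp [hpdef, hn]
  -- the two ranges coincide
  have hrange : PySem.List.pyRange 0 (n : Int) t = PySem.List.pyRange 0 (padded.length : Int) t := by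
    rw [PySem.List.pyRange_of_pos _ _ ht, PySem.List.pyRange_of_pos _ _ ht, hplen]
    congr 1
    rcases Nat.eq_zero_or_pos n with h0 | h0
    · have hp0 : pad = 0 := by rw [hpaddef, h0]; simp [PySem.Int.mod]
      simp [h0, hp0]
    · have hN : ((n + pad.toNat : ℕ) : Int) = t * q := by push_cast; omega
      have hc1 : ((n : Int) - 0 + t - 1) / t = q := by
        have : (n : Int) - 0 + t - 1 = (t - 1 - pad) + t * q := by omega
        rw [this, Int.add_mul_ediv_left _ _ (by omega), Int.ediv_eq_zero_of_lt (by omega) (by omega)]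
        omega
      have hc2 : (((n + pad.toNat : ℕ) : Int) - 0 + t - 1) / t = q := by
        have : ((n + pad.toNat : ℕ) : Int) - 0 + t - 1 = (t - 1) + t * q := by omega
        rw [this, Int.add_mul_ediv_left _ _ (by omega), Int.ediv_eq_zero_of_lt (by omega) (by omega)]
        omega
      rw [if_pos (by exact_mod_cast h0), if_pos (by push_cast; omega), hc1, hc2]
  rw [PySem.List.foldl_append_eq_flatMap, List.flatMap_map, hrange, List.nil_append]
  rw [List.flatMap_def, List.flatMap_def]
  congr 1
  apply List.map_congr_left
  intro i hi
  rw [hplen] at hi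
  have hi.toNat := (PySem.List.mem_pyRange_iff_of_pos ht i).mp hi
  obtain ⟨hi0, hiN, hidvd⟩ := hi.toNat
  rw [Int.sub_zero] at hidvd
  obtain ⟨r, hr⟩ := hidvd
  have hNpos : 0 < n + pad.toNat := by exact_mod_cast lt_of_le_of_lt hi0 hiN
  -- i is a multiple of t strictly below the padded length, hence i < n
  have hNq : ((n + pad.toNat : ℕ) : Int) = t * q := by push_cast; omega
  have hitN : i + t ≤ ((n + pad.toNat : ℕ) : Int) := by
    have hrq : r < q := by
      have h1 : t * r < t * q := by omega
      exact lt_of_mul_lt_mul_left h1 (le_of_lt ht)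
    have h2 : t * (r + 1) ≤ t * q := by
      apply mul_le_mul_of_nonneg_left _ (le_of_lt ht)
      omega
    have h3 : t * (r + 1) = t * r + t := by ring
    omega
  have hin : i < (n : Int) := by
    push_cast at hitN
    omega
  have hii : i = ((i.toNat : ℕ) : Int) := by omega
  -- the padded group read by A equals a window of `padded`
  have hgrp :
      (let grupo := PySem.List.slice cs (some i) (some (i + t))
       if (grupo.length : Int) < t then
         grupo ++ List.replicate (t - (grupo.length : Int)).toNat ' '
       else grupo)
      = (padded.drop i.toNat).take t.toNat := by
    show (if ((PySem.List.slice cs (some i) (some (i + t))).length : Int) < t then _ else _) = _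
    rw [PySem.List.slice_toNat cs hi0 (by omega : (0:Int) ≤ i + t)]
    have htn : (i + t).toNat - i.toNat = t.toNat := by omega
    rw [htn]
    have hlg : ((cs.drop i.toNat).take t.toNat).length = min t.toNat (n - i.toNat) := by
      simp [hn]
    have hdrop : padded.drop i.toNat = cs.drop i.toNat ++ List.replicate pad.toNat ' ' := by
      rw [hpdef, List.drop_append]
      have h0 : i.toNat - cs.length = 0 := by omega
      rw [h0, List.drop_zero]
    rcases le_or_gt t.toNat (n - i.toNat) with hcase | hcase
    · -- full group: no padding
      rw [if_neg (by rw [hlg]; omega)]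
      rw [hdrop, List.take_append]
      have h1 : (cs.drop i.toNat).length = n - i.toNat := by simp [hn]
      have h2 : t.toNat - (cs.drop i.toNat).length = 0 := by omega
      rw [h2, List.take_zero, List.append_nil]
    · -- short last group: A pads with spaces, B reads the padding of `padded`
      rw [if_pos (by rw [hlg]; push_cast; omega)]
      rw [hlg, hdrop, List.take_append]
      have h1 : (cs.drop i.toNat).length = n - i.toNat := by simp [hn]
      have h2 : (cs.drop i.toNat).take t.toNat = cs.drop i.toNat := List.take_of_length_le (by omega)
      rw [h2, List.take_replicate, h1]
      have hcnt : (t - ((min t.toNat (n - i.toNat) : ℕ) : Int)).toNat = min (t.toNat - (n - i.toNat)) pad.toNat := by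
        push_cast at hitN
        omega
      rw [hcnt]
  rw [hgrp]
  apply List.map_congr_left
  intro p hp
  obtain ⟨hp0, hp1⟩ := hb p hp
  -- both sides read the same character
  have hlen : ((padded.drop i.toNat).take t.toNat).length = t.toNat := by
    simp [hplen]
    omega
  set m : Int := PySem.Int.mod p t with hmdef
  have hm : m = if 0 ≤ p then p else p + t := pv_mod_inrange p t ht hp0 hp1
  have hm0 : 0 ≤ m := by rw [hm]; split_ifs <;> omega
  have hmt : m < t := by rw [hm]; split_ifs <;> omega
  have hidx : i + m = ((i.toNat + m.toNat : ℕ) : Int) := by push_cast; omega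
  have hB : padded[i.toNat + m.toNat]? = ((padded.drop i.toNat).take t.toNat)[m.toNat]? := by
    rw [List.getElem?_take, if_pos (by omega), List.getElem?_drop]
  rw [pv_pyGet_inrange ((padded.drop i.toNat).take t.toNat) p t ht (by rw [hlen]; omega) hp0 hp1,
    ← hmdef, hidx, PySem.List.pyGet?_natCast, hB]

-- column j of a list of length t*q: padded[j::t] = [padded[j + t*r] for r < q]
lemma pv_col (padded : List Char) (t : Int) (j : Int) (q : Nat) (ht : 0 < t)
    (hj0 : 0 ≤ j) (hjt : j < t) (hlen : (padded.length : Int) = t * q) :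
    PySem.List.slice? padded (some j) none t
      = some ((List.range q).map (fun (r : Nat) => padded.getD (j + t * (r : Int)).toNat ' ')) := by
  unfold PySem.List.slice? PySem.List.sliceIndices
  rw [if_neg (by omega : ¬ t = 0)]
  simp only [if_neg (by omega : ¬ t < 0)]
  rcases Nat.eq_zero_or_pos q with h0 | h0
  · subst h0
    have hnil : padded = [] := List.length_eq_zero_iff.mp (by
      have : (padded.length : Int) = 0 := by rw [hlen]; ring
      omega)
    subst hnil
    have hstart : (if j ≤ (0:Int) then j else 0) = 0 := by split_ifs <;> omega
    simp only [List.length_nil, Nat.cast_zero, min_def, hstart]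
    rw [if_neg (by omega : ¬ j < 0)]
    simp
  · have hq1 : (1 : Int) ≤ (q : Int) := by exact_mod_cast h0
    have hjlen : j < (padded.length : Int) := by nlinarith
    rw [if_neg (by omega : ¬ j < 0), min_eq_left (by omega)]
    rw [if_pos ht, if_pos hjlen]
    have hcount : (((padded.length : Int) - j + t - 1) / t).toNat = q := by
      have harith : (padded.length : Int) - j + t - 1 = (t - 1 - j) + t * q := by omega
      have h2 : ((padded.length : Int) - j + t - 1) / t = q := by
        rw [harith, Int.add_mul_ediv_left _ _ (by omega),
          Int.ediv_eq_zero_of_lt (by omega) (by omega)]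
        omega
      omega
    rw [hcount]
    congr 1
    rw [List.filterMap_congr
      (g := fun (r : Nat) => some (padded.getD (j + t * (r : Int)).toNat ' ')) ?_]
    · simp
    · intro r hr
      rw [List.mem_range] at hr
      have hr1 : (r : Int) ≤ (q : Int) - 1 := by
        have : (r : Int) < (q : Int) := by exact_mod_cast hr
        omega
      have hidx : ((j + t * (r:Int)).toNat : Int) < (padded.length : Int) := by
        rw [Int.toNat_of_nonneg (by positivity)]
        nlinarith
      have hlt : (j + t * (r:Int)).toNat < padded.length := by exact_mod_cast hidx
      simp [List.getElem?_eq_getElem hlt]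

-- zip(*ls) of equal-length lists is the list of rows
lemma pv_zip (q : Nat) (ls : List (List Char)) (hne : ls ≠ [])
    (hlen : ∀ l ∈ ls, l.length = q) :
    pvZipStar q ls = (List.range q).map (fun r => ls.map (fun l => l.getD r ' ')) := by
  induction q generalizing ls with
  | zero => simp [pvZipStar]
  | succ n ih =>
    have h1 : ls.isEmpty = false := by
      simpa [List.isEmpty_iff] using hne
    have h2 : ls.any List.isEmpty = false := by
      rw [List.any_eq_false]
      intro l hl
      have := hlen l hl
      simp [List.isEmpty_iff]
      intro h; rw [h] at this; simp at this
    rw [pvZipStar, h1, h2]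
    simp only [Bool.false_or, Bool.false_eq_true, if_false]
    rw [List.range_succ_eq_map, List.map_cons, List.map_map]
    congr 1
    · apply List.map_congr_left
      intro l hl
      have hlq := hlen l hl
      cases l with
      | nil => simp at hlq
      | cons a tl => simp
    · rw [ih (ls.map List.tail) (by simpa using hne) ?_]
      · apply List.map_congr_left
        intro r hr
        rw [Function.comp_apply, List.map_map]
        apply List.map_congr_left
        intro l hl
        have hlq := hlen l hl
        cases l with
        | nil => simp at hlq
        | cons a tl => simp [Function.comp, Nat.succ_eq_add_one]
      · intro l hl
        rw [List.mem_map] at hl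
        obtain ⟨l0, hl0, rfl⟩ := hl
        have := hlen l0 hl0
        simp [this]

-- B's column/zip pipeline reads the padded message at base + (p % t)
lemma pv_core_B (cs : List Char) (t : Int) (perm : List Int) (ht : 0 < t)
    (hlenp : (perm.length : Int) = t)
    (hb : ∀ p ∈ perm, -t ≤ p ∧ p < t) :
    (pvZipStar
      (((perm.map (fun p => (PySem.List.pyGet?
          ((PySem.List.pyRange 0 t 1).map (fun j =>
            (PySem.List.slice? (cs ++ List.replicate (PySem.Int.mod (-(cs.length : Int)) t).toNat ' ') (some j) none t).getD [])) p).getD [])).headD []).length)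
      (perm.map (fun p => (PySem.List.pyGet?
          ((PySem.List.pyRange 0 t 1).map (fun j =>
            (PySem.List.slice? (cs ++ List.replicate (PySem.Int.mod (-(cs.length : Int)) t).toNat ' ') (some j) none t).getD [])) p).getD []))).flatten
    = (PySem.List.pyRange 0 (((cs ++ List.replicate (PySem.Int.mod (-(cs.length : Int)) t).toNat ' ').length : Int)) t).flatMap (fun base =>
        perm.map (fun p =>
          (PySem.List.pyGet? (cs ++ List.replicate (PySem.Int.mod (-(cs.length : Int)) t).toNat ' ')
            (base + PySem.Int.mod p t)).getD ' ')) := by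
  set n : ℕ := cs.length with hn
  set pad : Int := PySem.Int.mod (-(n : Int)) t with hpaddef
  have hpad0 : 0 ≤ pad := PySem.Int.mod_nonneg _ ht
  obtain ⟨qI, hqI⟩ := pv_dvd_padded (n : Int) t ht
  set padded : List Char := cs ++ List.replicate pad.toNat ' ' with hpdef
  set q : ℕ := qI.toNat with hqdef
  have hqI0 : 0 ≤ qI := by nlinarith [hqI, Int.toNat_of_nonneg hpad0]
  have hq' : ((q : ℕ) : Int) = qI := Int.toNat_of_nonneg hqI0
  have hplen : (padded.length : Int) = t * q := by
    simp only [hpdef, List.length_append, List.length_replicate]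
    rw [hq']
    push_cast
    omega
  set G : Int → List Char := fun m => (List.range q).map (fun (r : Nat) => padded.getD (m + t * (r : Int)).toNat ' ') with hG
  -- the columns selected by the permutation
  have hsel : perm.map (fun p => (PySem.List.pyGet?
        ((PySem.List.pyRange 0 t 1).map (fun j => (PySem.List.slice? padded (some j) none t).getD [])) p).getD [])
      = perm.map (fun p => G (PySem.Int.mod p t)) := by
    apply List.map_congr_left
    intro p hp
    obtain ⟨hp0, hp1⟩ := hb p hp
    have hm0 : 0 ≤ PySem.Int.mod p t := PySem.Int.mod_nonneg _ ht
    have hmt : PySem.Int.mod p t < t := PySem.Int.mod_lt _ ht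
    set m : Int := PySem.Int.mod p t with hmdef
    have hcols_len : (((PySem.List.pyRange 0 t 1).map (fun j => (PySem.List.slice? padded (some j) none t).getD [])).length : Int) = t := by
      rw [List.length_map, PySem.List.length_pyRange_one]
      omega
    rw [pv_pyGet_inrange _ p t ht hcols_len hp0 hp1, ← hmdef]
    rw [List.getElem?_map, PySem.List.pyRange_one]
    rw [List.getElem?_map, List.getElem?_range (by omega)]
    simp only [Option.map_some]
    rw [Option.getD_some]
    have hj : (0 : Int) + (m.toNat : Int) = m := by omega
    rw [hj, pv_col padded t m q ht hm0 hmt hplen]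
    rw [Option.getD_some]
  rw [hsel]
  -- every selected column has q rows; the zip fuel is q
  have hlenG : ∀ l ∈ perm.map (fun p => G (PySem.Int.mod p t)), l.length = q := by
    intro l hl
    rw [List.mem_map] at hl
    obtain ⟨p, hp, rfl⟩ := hl
    simp [hG]
  have hperm_ne : perm ≠ [] := by
    intro h
    rw [h] at hlenp
    simp at hlenp
    omega
  have hfuel : ((perm.map (fun p => G (PySem.Int.mod p t))).headD []).length = q := by
    cases perm with
    | nil => exact absurd rfl hperm_ne
    | cons p0 rest => simp [hG]
  rw [hfuel, pv_zip q _ (by simpa using hperm_ne) hlenG]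
  -- both sides are now row-major reads of `padded`
  rw [← List.flatMap_def]
  rw [PySem.List.pyRange_of_pos _ _ ht]
  have hcount : (if (0:Int) < (padded.length : Int) then (((padded.length : Int) - 0 + t - 1) / t).toNat else 0) = q := by
    rcases Nat.eq_zero_or_pos q with h0 | h0
    · rw [if_neg (by rw [hplen, h0]; simp)]
      omega
    · have hq1 : (1 : Int) ≤ (q : Int) := by exact_mod_cast h0
      rw [if_pos (by nlinarith)]
      have harith : (padded.length : Int) - 0 + t - 1 = (t - 1) + t * q := by omega
      have h2 : ((padded.length : Int) - 0 + t - 1) / t = q := by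
        rw [harith, Int.add_mul_ediv_left _ _ (by omega),
          Int.ediv_eq_zero_of_lt (by omega) (by omega)]
        omega
      omega
    
  rw [hcount, List.flatMap_map]
  rw [List.flatMap_def, List.flatMap_def]
  congr 1
  apply List.map_congr_left
  intro r hr
  rw [List.mem_range] at hr
  rw [List.map_map]
  apply List.map_congr_left
  intro p hp
  rw [Function.comp_apply]
  set m : Int := PySem.Int.mod p t with hmdef
  have hm0 : 0 ≤ m := PySem.Int.mod_nonneg _ ht
  have hr0 : (0 : Int) ≤ t * (r : Int) := by positivity
  have hGr : (G m).getD r ' ' = padded.getD (m + t * (r : Int)).toNat ' ' := by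
    rw [hG]
    simp only [List.getD_eq_getElem?_getD, List.getElem?_map, List.getElem?_range hr]
    simp
  rw [hGr]
  have hidx : (0 : Int) + t * (r : Int) + m = (((m + t * (r : Int)).toNat : ℕ) : Int) := by
    rw [Int.toNat_of_nonneg (by omega)]
    ring
  rw [hidx, PySem.List.pyGet?_natCast, List.getD_eq_getElem?_getD]


-- ===== VERDICT (by name: the statement is the Claim_ definition above) =====
theorem cifrado_transposicion_grupos_spec : Claim_equal_cifrado_transposicion_grupos := by
  intro mensaje tam_grupo permutacion _ hpre
  obtain ⟨ht, hlp, hb⟩ := hpre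
  show _ = _
  unfold cifrado_transposicion_grupos cifrado_transposicion_grupos_alt
  simp only []
  exact congrArg String.ofList
    ((pv_core_A mensaje.toList tam_grupo permutacion ht hb).trans
      (pv_core_B mensaje.toList tam_grupo permutacion ht hlp hb).symm)
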